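-- pv_equiv track=rewrite | github.com/jovisly/AdventOfCode | 2023/day_12/slow/part1-b.py | make_template_arr
-- ===== SOURCE A (Python) =====
-- def make_template_arr(numbers):
--     """Given [2, 3], return ["", "##", ".", "###", ""].
--
--     Then we can add more "." to construct the full sequence.
--     """
--     template_arr = [""]
--     for index, number in enumerate(numbers):
--         template_arr.append("#" * number)
--         if index != len(numbers) - 1:
--             template_arr.append(".")
--
--     template_arr.append("")
--     return template_arr
-- ===== SOURCE B (Python) =====
-- def make_template_arr(numbers):
--     """Given [2, 3], return ["", "##", ".", "###", ""].
--
--     Each output slot is computed directly from its index: slot 0 and the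
--     last slot are the empty ends, odd slots hold "#"*numbers[i//2], and
--     the remaining even slots hold ".".
--     """
--     size = 2 * len(numbers) + 1 if numbers else 2
--
--     def cell(i):
--         if i == 0 or i == size - 1:
--             return ""
--         return "#" * numbers[i // 2] if i % 2 == 1 else "."
--
--     return [cell(i) for i in range(size)]
-- ===== Notes on version B (the rewrite author's own statement) =====
-- stated objective: alternative
-- what changed: Replaces A's sequential emission loop (enumerate with a last-index conditional, appending as it goes) by a positional construction: the output length is computed in closed form and each slot is derived from its index (ends empty, odd slots hash-blocks via random access numbers[i//2], even slots dots).
import Mathlib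
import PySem

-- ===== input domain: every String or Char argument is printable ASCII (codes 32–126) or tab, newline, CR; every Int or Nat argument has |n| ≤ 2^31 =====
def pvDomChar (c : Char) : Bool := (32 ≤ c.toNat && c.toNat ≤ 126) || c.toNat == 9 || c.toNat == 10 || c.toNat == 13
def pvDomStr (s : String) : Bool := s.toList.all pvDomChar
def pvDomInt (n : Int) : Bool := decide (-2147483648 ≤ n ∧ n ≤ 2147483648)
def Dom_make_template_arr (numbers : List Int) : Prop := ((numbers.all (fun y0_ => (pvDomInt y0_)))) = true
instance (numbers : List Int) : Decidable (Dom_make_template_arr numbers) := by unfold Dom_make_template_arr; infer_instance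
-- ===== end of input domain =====

-- B (alternative): positional construction — output length in closed form, each slot derived from its index — instead of A's sequential emission loop with a last-index conditional.


-- ===== PORT A =====
-- "#" * number (Python str*int; negative count gives "") = String.ofList (pyRepeat ['#'] number)
def make_template_arr (numbers : List Int) : List String :=
  ((PySem.List.enumerate numbers 0).foldl (fun ta p =>
      (if p.1 ≠ (numbers.length : Int) - 1
       then (ta ++ [String.ofList (PySem.List.pyRepeat ['#'] p.2)]) ++ ["."]
       else ta ++ [String.ofList (PySem.List.pyRepeat ['#'] p.2)])) [""]) ++ [""]

-- ===== PORT B =====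
-- the nested `cell` of Source B; numbers[i // 2] is always in range at the odd slots,
-- so the .getD default 0 is never used
def pvCell (numbers : List Int) (size : Nat) (i : Nat) : String :=
  if i = 0 ∨ i = size - 1 then ""
  else if i % 2 = 1 then String.ofList (PySem.List.pyRepeat ['#'] (numbers.getD (i / 2) 0))
  else "."

def make_template_arr_alt (numbers : List Int) : List String :=
  let size : Nat := if numbers.isEmpty then 2 else 2 * numbers.length + 1
  (List.range size).map (pvCell numbers size)

-- ===== PRECONDITION & SPEC =====
def Spec_make_template_arr (numbers : List Int) (out : List String) : Prop := out = make_template_arr_alt numbers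
instance (numbers : List Int) (out : List String) : Decidable (Spec_make_template_arr numbers out) := by unfold Spec_make_template_arr; infer_instance

-- ===== CLAIM (what is proved, stated in full; the proofs are below) =====
def Claim_equal_make_template_arr : Prop := ∀ (numbers : List Int), Dom_make_template_arr numbers → Spec_make_template_arr numbers (make_template_arr numbers)

-- ===== LEMMAS AND PROOFS =====

def pvHash (n : Int) : String := String.ofList (PySem.List.pyRepeat ['#'] n)

-- the middle of the output: hash-blocks separated by dots
def pvBlocks : List Int → List String
  | [] => []
  | [n] => [pvHash n]
  | n :: m :: rest => pvHash n :: "." :: pvBlocks (m :: rest)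

-- what A's loop appends after the accumulator, starting at index k with full length N
def pvLoopTail (N : Int) (k : Int) : List Int → List String
  | [] => []
  | n :: rest =>
    (if k ≠ N - 1 then [pvHash n, "."] else [pvHash n]) ++ pvLoopTail N (k + 1) rest

lemma loopA (N : Int) (xs : List Int) :
    ∀ (k : Int) (acc : List String),
    (PySem.List.enumerate xs k).foldl (fun ta p =>
      (if p.1 ≠ N - 1
       then (ta ++ [String.ofList (PySem.List.pyRepeat ['#'] p.2)]) ++ ["."]
       else ta ++ [String.ofList (PySem.List.pyRepeat ['#'] p.2)])) acc
    = acc ++ (pvLoopTail N k xs)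
  := by
  induction xs with
  | nil => intro k acc; simp [PySem.List.enumerate_nil, pvLoopTail]
  | cons n rest ih =>
    intro k acc
    rw [PySem.List.enumerate_cons, List.foldl_cons, ih]
    simp only [pvLoopTail, pvHash]
    split_ifs <;> simp

lemma loopTail_eq_blocks (N : Int) (xs : List Int) :
    ∀ k : Int, k + xs.length = N → pvLoopTail N k xs = pvBlocks xs := by
  induction xs with
  | nil => intro k _; rfl
  | cons n rest ih =>
    intro k hk
    cases rest with
    | nil =>
      simp only [List.length_cons, List.length_nil] at hk
      simp [pvLoopTail, pvBlocks, show k = N - 1 by omega]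
    | cons m r =>
      have hne : k ≠ N - 1 := by
        simp only [List.length_cons] at hk
        omega
      have h1 : pvLoopTail N (k + 1) (m :: r) = pvBlocks (m :: r) :=
        ih (k + 1) (by simp only [List.length_cons] at hk ⊢; push_cast at hk ⊢; omega)
      rw [pvLoopTail, if_pos hne, h1]
      simp [pvBlocks]

lemma blocks_append (xs : List Int) (n : Int) (h : xs ≠ []) :
    pvBlocks (xs ++ [n]) = pvBlocks xs ++ [".", pvHash n] := by
  induction xs with
  | nil => exact absurd rfl h
  | cons a rest ih =>
    cases rest with
    | nil => simp [pvBlocks]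
    | cons b r =>
      have h2 := ih (by simp)
      simp only [List.cons_append] at h2
      simp [pvBlocks, h2]

lemma altB (xs : List Int) :
    make_template_arr_alt xs = [""] ++ pvBlocks xs ++ [""] := by
  induction xs using List.reverseRecOn with
  | nil => decide
  | append_singleton ys n ih =>
    cases ys with
    | nil =>
      simp [make_template_arr_alt, pvBlocks, pvHash, pvCell,
            List.range_succ, List.getD]
    | cons a t =>
      -- ys = a :: t, nonempty; let k = (a :: t).length
      set xs0 : List Int := a :: t with hxs0
      have hk : xs0 ≠ [] := by simp [hxs0]
      set k : Nat := xs0.length with hkdef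
      have hk1 : 1 ≤ k := by simp [hkdef, hxs0]
      have hsizeO : (if xs0.isEmpty then 2 else 2 * xs0.length + 1) = 2 * k + 1 := by
        simp [hxs0, hkdef]
      have hsizeN : (if (xs0 ++ [n]).isEmpty then 2 else 2 * (xs0 ++ [n]).length + 1)
          = 2 * k + 3 := by
        simp [hkdef]; omega
      -- congruence of cells below index 2k
      have hcong : ∀ i < 2 * k, pvCell (xs0 ++ [n]) (2 * k + 3) i = pvCell xs0 (2 * k + 1) i := by
        intro i hi
        unfold pvCell
        have h2 : i ≠ 2 * k + 3 - 1 := by omega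
        have h3 : i ≠ 2 * k + 1 - 1 := by omega
        by_cases h0 : i = 0
        · simp [h0]
        · rw [if_neg (show ¬(i = 0 ∨ i = 2 * k + 3 - 1) by push Not; exact ⟨h0, h2⟩),
              if_neg (show ¬(i = 0 ∨ i = 2 * k + 1 - 1) by push Not; exact ⟨h0, h3⟩)]
          split_ifs with hodd
          · have hlt : i / 2 < xs0.length := by
              rw [← hkdef]; omega
            rw [List.getD_append _ _ _ _ hlt]
          · rfl
      -- old map, split at 2k
      have ihO : (List.range (2 * k + 1)).map (pvCell xs0 (2 * k + 1))
          = [""] ++ pvBlocks xs0 ++ [""] := by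
        have := ih
        rw [make_template_arr_alt] at this
        simpa [hsizeO] using this
      have hlastO : pvCell xs0 (2 * k + 1) (2 * k) = "" := by
        unfold pvCell; simp
      have hsplitO : (List.range (2 * k + 1)).map (pvCell xs0 (2 * k + 1))
          = (List.range (2 * k)).map (pvCell xs0 (2 * k + 1)) ++ [""] := by
        rw [List.range_succ, List.map_append]; simp [hlastO]
      have hmidO : (List.range (2 * k)).map (pvCell xs0 (2 * k + 1))
          = [""] ++ pvBlocks xs0 := by
        have h := ihO
        rw [hsplitO] at h
        exact List.append_cancel_right h
      -- new side
      have hN1 : pvCell (xs0 ++ [n]) (2 * k + 3) (2 * k) = "." := by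
        unfold pvCell
        rw [if_neg (by omega), if_neg (by omega)]
      have hN2 : pvCell (xs0 ++ [n]) (2 * k + 3) (2 * k + 1) = pvHash n := by
        unfold pvCell
        rw [if_neg (by omega), if_pos (by omega)]
        have : (2 * k + 1) / 2 = k := by omega
        rw [this, hkdef]
        simp [pvHash]
      have hN3 : pvCell (xs0 ++ [n]) (2 * k + 3) (2 * k + 2) = "" := by
        unfold pvCell; rw [if_pos (by omega)]
      rw [make_template_arr_alt]
      simp only [hsizeN]
      rw [show 2 * k + 3 = (2 * k + 2) + 1 from rfl, List.range_succ, List.map_append,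
          show 2 * k + 2 = (2 * k + 1) + 1 from rfl, List.range_succ, List.map_append,
          show 2 * k + 1 = (2 * k) + 1 from rfl, List.range_succ, List.map_append,
          List.map_congr_left (fun i hi => hcong i (List.mem_range.mp hi)),
          hmidO, blocks_append xs0 n hk]
      simp [hN1, hN2, hN3]

-- ===== VERDICT (by name: the statement is the Claim_ definition above) =====
theorem make_template_arr_spec : Claim_equal_make_template_arr := by
  intro numbers _
  unfold Spec_make_template_arr
  show make_template_arr numbers = make_template_arr_alt numbers
  unfold make_template_arr
  rw [loopA, loopTail_eq_blocks (numbers.length : Int) numbers 0 (by simp), altB]
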